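-- pv_equiv track=rewrite | github.com/DeffreusTheda/CTF | Reverse Engineering/!Probset/Shuffle/sleep.py | visualize_character_positions
-- ===== SOURCE A (Python) =====
-- def visualize_character_positions(input_string):
--     """
--     Create a visualization of where each character appears in the string.
--     """
--     char_positions = {}
--
--     for index, char in enumerate(input_string):
--         if char not in char_positions:
--             char_positions[char] = []
--         char_positions[char].append(index)
--
--     # Sort by first appearance
--     sorted_chars = sorted(char_positions.keys(), key=lambda c: char_positions[c][0])
--
--     visualization = []
--     for char in sorted_chars:
--         positions = char_positions[char]
--         line = f"'{char}': " + " " * positions[0] + "*"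
--
--         for i in range(1, len(positions)):
--             spaces = positions[i] - positions[i-1] - 1
--             line += " " * spaces + "*"
--
--         visualization.append(line)
--
--     return visualization
-- ===== SOURCE B (Python) =====
-- def visualize_character_positions(input_string):
--     """
--     Create a visualization of where each character appears in the string.
--     """
--     result = []
--     for char in dict.fromkeys(input_string):
--         cols = {i for i, c in enumerate(input_string) if c == char}
--         last = max(cols)
--         result.append(f"'{char}': "
--                       + ''.join('*' if i in cols else ' ' for i in range(last + 1)))
--     return result
-- ===== Notes on version B (the rewrite author's own statement) =====
-- stated objective: alternative
-- what changed: B drops A's explicit sort (dict insertion order already is first-appearance order) and replaces A's consecutive-gap space arithmetic by painting each line as a per-column membership mask over range(last_position + 1) using a position set per character.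
import Mathlib
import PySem

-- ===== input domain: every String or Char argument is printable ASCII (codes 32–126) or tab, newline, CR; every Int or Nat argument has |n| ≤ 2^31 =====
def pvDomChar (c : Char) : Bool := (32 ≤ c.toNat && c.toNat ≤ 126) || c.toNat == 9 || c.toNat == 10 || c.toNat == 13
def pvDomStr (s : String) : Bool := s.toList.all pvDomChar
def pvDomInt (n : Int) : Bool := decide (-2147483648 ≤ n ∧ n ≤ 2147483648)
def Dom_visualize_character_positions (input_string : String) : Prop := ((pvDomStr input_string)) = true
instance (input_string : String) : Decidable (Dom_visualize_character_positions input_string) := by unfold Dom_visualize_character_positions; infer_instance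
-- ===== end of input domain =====

-- B replaces A's sort-by-first-appearance and consecutive-gap arithmetic by iterating the
-- distinct characters in first-appearance order and painting each line as a per-column
-- membership mask (objective: alternative decomposition; no speed claim).

-- ===== PORT A =====
-- the dict-building loop of A ('if char not in …: …[char] = []' then '.append(index)')
def dictA (l : List Char) : PySem.Dict Char (List Int) :=
  (PySem.List.enumerate l 0).foldl
    (fun d p =>
      let d1 := if d.contains p.2 then d else d.insert p.2 ([] : List Int)
      d1.insert p.2 (d1.getD p.2 [] ++ [p.1]))
    PySem.Dict.empty

def visualize_character_positions (input_string : String) : List String :=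
  let l := input_string.toList
  let char_positions := dictA l
  -- positions[0]: the position lists are never empty, so pyGetD's default is never used
  let sorted_chars := PySem.List.sorted char_positions.keys
      (fun c => PySem.List.pyGetD (char_positions.getD c []) 0 0)
  sorted_chars.foldl
    (fun vis c =>
      let positions := char_positions.getD c []
      let line : List Char :=
        '\'' :: c :: '\'' :: ':' :: ' ' ::
          (List.replicate (PySem.List.pyGetD positions 0 0).toNat ' ' ++ ['*'])
      let line := (PySem.List.pyRange 1 (positions.length : Int)).foldl
        (fun line i =>
          line ++ List.replicate
            (PySem.List.pyGetD positions i 0 - PySem.List.pyGetD positions (i - 1) 0 - 1).toNat ' '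
            ++ ['*'])
        line
      vis ++ [String.ofList line])
    []

-- ===== PORT B =====
-- the set comprehension '{i for i, c in enumerate(input_string) if c == char}'
def posOf (l : List Char) (c : Char) : List Int :=
  ((PySem.List.enumerate l 0).filter (fun p => p.2 == c)).map (·.1)

def visualize_character_positions_alt (input_string : String) : List String :=
  let l := input_string.toList
  (PySem.List.dedup l).foldl
    (fun result c =>
      let cols : PySem.Set Int := PySem.Set.ofList (posOf l c)
      -- max(cols): cols is never empty, so the default is never used
      let last := (PySem.List.max? cols (fun x => x)).getD 0
      result ++ [String.ofList
        ('\'' :: c :: '\'' :: ':' :: ' ' ::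
          (PySem.List.pyRange 0 (last + 1)).map (fun i => if cols.contains i then '*' else ' '))])
    []

-- ===== PRECONDITION & SPEC =====
def Spec_visualize_character_positions (input_string : String) (out : List String) : Prop := out = visualize_character_positions_alt input_string
instance (input_string : String) (out : List String) : Decidable (Spec_visualize_character_positions input_string out) := by unfold Spec_visualize_character_positions; infer_instance

-- ===== CLAIM (what is proved, stated in full; the proofs are below) =====
def Claim_equal_visualize_character_positions : Prop := ∀ (input_string : String), Dom_visualize_character_positions input_string → Spec_visualize_character_positions input_string (visualize_character_positions input_string)

-- ===== LEMMAS AND PROOFS =====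

lemma posOf_nonneg (l : List Char) (c : Char) : ∀ x ∈ posOf l c, 0 ≤ x := by
  intro x hx
  simp only [posOf, List.mem_map, List.mem_filter] at hx
  obtain ⟨p, ⟨hp, _⟩, rfl⟩ := hx
  rw [PySem.List.mem_enumerate_iff] at hp
  obtain ⟨k, hk, rfl⟩ := hp
  simp

lemma posOf_sorted (l : List Char) (c : Char) : (posOf l c).Pairwise (· < ·) := by
  exact ((PySem.List.pairwise_lt_enumerate l 0).filter _).map _ (fun _ _ h => h)

lemma posOf_nodup (l : List Char) (c : Char) : (posOf l c).Nodup :=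
  (posOf_sorted l c).imp ne_of_lt

lemma posOf_ne_nil (l : List Char) (c : Char) (hc : c ∈ l) : posOf l c ≠ [] := by
  obtain ⟨k, hk, rfl⟩ := List.mem_iff_getElem.mp hc
  apply List.ne_nil_of_mem (a := (k : Int))
  simp only [posOf, List.mem_map, List.mem_filter]
  exact ⟨((k : Int), l[k]), ⟨(PySem.List.mem_enumerate_iff l 0 _).mpr ⟨k, hk, by simp⟩, by simp⟩, rfl⟩

lemma posOfS_head (l : List Char) (c : Char) (hc : c ∈ l) : ∀ s : Int,
    (((PySem.List.enumerate l s).filter (fun p => p.2 == c)).map (·.1)).head? = some (s + l.idxOf c) := by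
  induction l with
  | nil => cases hc
  | cons x t ih =>
    intro s
    rw [PySem.List.enumerate_cons]
    by_cases hx : x = c
    · subst hx
      simp [List.filter_cons, List.idxOf_cons]
    · have hct : c ∈ t := by cases hc with | head => exact absurd rfl hx | tail _ h => exact h
      have hxc : (x == c) = false := by simp [hx]
      simp only [List.filter_cons, hxc, if_neg, Bool.false_eq_true, not_false_iff, ite_false]
      rw [ih hct (s + 1)]
      congr 1
      rw [List.idxOf_cons, hxc]
      simp only [cond_false]
      push_cast
      ring

lemma posOf_head (l : List Char) (c : Char) (hc : c ∈ l) :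
    PySem.List.pyGetD (posOf l c) 0 0 = (l.idxOf c : Int) := by
  have h := posOfS_head l c hc 0
  rw [show ((0 : Int)) = ((0 : Nat) : Int) from rfl, PySem.List.pyGetD_natCast]
  cases hp : ((PySem.List.enumerate l 0).filter (fun p => p.2 == c)).map (·.1) with
  | nil => rw [hp] at h; cases h
  | cons a t =>
    rw [hp] at h
    simp only [List.head?_cons, Option.some.injEq] at h
    simp [posOf, hp, h]

lemma dictA_step (d : PySem.Dict Char (List Int)) (p : Int × Char) :
    (let d1 := if d.contains p.2 then d else d.insert p.2 ([] : List Int)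
     d1.insert p.2 (d1.getD p.2 [] ++ [p.1])) = d.modify p.2 [] (· ++ [p.1]) := by
  cases h : d.contains p.2 with
  | true => simp [h, PySem.Dict.modify]
  | false =>
    simp [h, PySem.Dict.modify, PySem.Dict.getD_insert_self, PySem.Dict.insert_insert_self,
      PySem.Dict.getD_of_not_contains d [] h]

lemma dictA_eq_modify (l : List Char) :
    dictA l = (PySem.List.enumerate l 0).foldl (fun d p => d.modify p.2 [] (· ++ [p.1]))
      PySem.Dict.empty := by
  unfold dictA
  exact congrFun (congrFun (congrArg _ (funext fun d => funext fun p => dictA_step d p)) _) _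

lemma dictA_getD (l : List Char) (c : Char) : (dictA l).getD c [] = posOf l c := by
  rw [dictA_eq_modify]
  rw [show (PySem.List.enumerate l 0).foldl (fun d p => d.modify p.2 [] (· ++ [p.1]))
        PySem.Dict.empty
      = ((PySem.List.enumerate l 0).map (fun p => (p.2, p.1))).foldl
        (fun d q => d.modify q.1 [] (· ++ [q.2])) PySem.Dict.empty from
      (List.foldl_map (f := fun p : Int × Char => (p.2, p.1))
        (g := fun (d : PySem.Dict Char (List Int)) (q : Char × Int) =>
          d.modify q.1 [] (· ++ [q.2]))).symm]
  rw [PySem.Dict.getD_foldl_modify_append]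
  simp [posOf, List.filter_map, List.map_map, Function.comp_def]

lemma dictA_keys (l : List Char) : (dictA l).keys = PySem.Set.ofList l := by
  rw [dictA_eq_modify]
  rw [PySem.Dict.keys_foldl_modify_key (PySem.List.enumerate l 0) (fun p => p.2) []
    (fun _ p v => v ++ [p.1]) PySem.Dict.empty]
  rw [PySem.List.map_snd_enumerate, PySem.Dict.keys_empty]
  rfl

lemma pw_ofList (l : List Char) :
    (PySem.Set.ofList l).Pairwise (fun a b => l.idxOf a < l.idxOf b) := by
  induction l using List.reverseRecOn with
  | nil => simp [PySem.Set.ofList, PySem.Set.empty]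
  | append_singleton t x ih =>
    have hof : PySem.Set.ofList (t ++ [x]) = PySem.Set.add (PySem.Set.ofList t) x := by
      simp [PySem.Set.ofList, List.foldl_append]
    have hmem : ∀ a, a ∈ PySem.Set.ofList t → a ∈ t := fun a ha =>
      (PySem.Set.mem_ofList t a).mp ha
    by_cases hx : x ∈ t
    · have : PySem.Set.add (PySem.Set.ofList t) x = PySem.Set.ofList t := by
        simp only [PySem.Set.add, PySem.Set.contains]
        rw [if_pos]
        simp [hx]
      rw [hof, this]
      refine ih.imp_of_mem ?_
      intro a b ha hb hab
      rwa [List.idxOf_append, List.idxOf_append, if_pos (hmem a ha), if_pos (hmem b hb)]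
    · have : PySem.Set.add (PySem.Set.ofList t) x = PySem.Set.ofList t ++ [x] := by
        simp only [PySem.Set.add, PySem.Set.contains]
        rw [if_neg]
        simp [hx]
      rw [hof, this, List.pairwise_append]
      refine ⟨ih.imp_of_mem ?_, List.pairwise_singleton _ _, ?_⟩
      · intro a b ha hb hab
        rwa [List.idxOf_append, List.idxOf_append, if_pos (hmem a ha), if_pos (hmem b hb)]
      · intro a ha b hb
        rw [List.mem_singleton] at hb; subst hb
        rw [List.idxOf_append, List.idxOf_append, if_pos (hmem a ha), if_neg hx]
        have h1 : t.idxOf a < t.length := List.idxOf_lt_length_of_mem (hmem a ha)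
        omega

lemma sorted_keys (l : List Char) :
    PySem.List.sorted (dictA l).keys (fun c => PySem.List.pyGetD ((dictA l).getD c []) 0 0)
      = (dictA l).keys := by
  apply PySem.List.sorted_eq_of_perm_of_pairwise_lt _ _ _ (List.Perm.refl _)
  rw [dictA_keys]
  refine (pw_ofList l).imp_of_mem ?_
  intro a b ha hb hab
  have hal : a ∈ l := (PySem.Set.mem_ofList l a).mp ha
  have hbl : b ∈ l := (PySem.Set.mem_ofList l b).mp hb
  rw [dictA_getD, dictA_getD, posOf_head l a hal, posOf_head l b hbl]
  exact_mod_cast hab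

lemma ofList_nodup {α : Type} [BEq α] [LawfulBEq α] (xs : List α) (h : xs.Nodup) :
    PySem.Set.ofList xs = xs := by
  induction xs using List.reverseRecOn with
  | nil => rfl
  | append_singleton t x ih =>
    obtain ⟨ht, hx⟩ : t.Nodup ∧ x ∉ t := by
      rw [List.nodup_append] at h
      exact ⟨h.1, fun hc => h.2.2 x hc x (List.mem_singleton_self x) rfl⟩
    simp only [PySem.Set.ofList, List.foldl_append, List.foldl_cons, List.foldl_nil]
    rw [show List.foldl PySem.Set.add PySem.Set.empty t = PySem.Set.ofList t from rfl, ih ht]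
    simp only [PySem.Set.add, PySem.Set.contains]
    rw [if_neg]
    simp [hx]

lemma sorted_le_getLast (p : List Int) (hp : p.Pairwise (· < ·)) (hne : p ≠ []) :
    ∀ y ∈ p, y ≤ p.getLast hne := by
  intro y hy
  rw [List.pairwise_iff_getElem] at hp
  obtain ⟨i, hi, rfl⟩ := List.mem_iff_getElem.mp hy
  rw [List.getLast_eq_getElem]
  rcases Nat.lt_or_ge i (p.length - 1) with h | h
  · exact le_of_lt (hp i (p.length - 1) hi (by omega) h)
  · have : i = p.length - 1 := by omega
    subst this; exact le_refl _

lemma max_last (p : List Int) (hp : p.Pairwise (· < ·)) (hne : p ≠ []) :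
    (PySem.List.max? p (fun x => x)).getD 0 = p.getLast hne := by
  cases p with
  | nil => exact absurd rfl hne
  | cons x t =>
    rw [PySem.List.max?_id_cons]
    simp only [Option.getD_some]
    have hle := sorted_le_getLast (x :: t) hp hne
    have hub := PySem.List.le_foldl_max t x
    have h1 : (x :: t).getLast hne ≤ List.foldl max x t := by
      rcases List.mem_cons.mp (List.getLast_mem hne) with h | h
      · rw [h]; exact hub.1
      · exact hub.2 _ h
    have h2 : List.foldl max x t ≤ (x :: t).getLast hne := by
      rcases PySem.List.foldl_max_mem t x with h | h
      · rw [h]; exact hle x List.mem_cons_self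
      · exact hle _ (List.mem_cons_of_mem x h)
    omega

lemma mask_blank (p : List Int) : ∀ (n : Nat) (a b : Int), (b - a).toNat = n →
    (∀ i, a ≤ i → i < b → i ∉ p) →
    (PySem.List.pyRange a b).map (fun i => if p.contains i then '*' else ' ')
      = List.replicate n ' ' := by
  intro n
  induction n with
  | zero =>
    intro a b hab _
    have : ¬ a < b := by omega
    simp [PySem.List.pyRange, this]
  | succ m ih =>
    intro a b hab hmem
    have hlt : a < b := by omega
    rw [PySem.List.pyRange_one_cons hlt, List.map_cons]
    have hna : a ∉ p := hmem a le_rfl hlt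
    have : p.contains a = false := by simpa using hna
    rw [this, List.replicate_succ]
    simp only [Bool.false_eq_true, if_false]
    congr 1
    exact ih (a + 1) b (by omega) (fun i h1 h2 => hmem i (by omega) h2)

lemma pyGetD_append_left (p q : List Int) (i : Int) (h0 : 0 ≤ i) (hj : i < p.length) (d : Int) :
    PySem.List.pyGetD (p ++ q) i d = PySem.List.pyGetD p i d := by
  rw [PySem.List.pyGetD_of_nonneg _ d h0, PySem.List.pyGetD_of_nonneg _ d h0,
    List.getD_eq_getElem?_getD, List.getD_eq_getElem?_getD,
    List.getElem?_append_left (by omega)]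

lemma pyGetD_concat_last (p : List Int) (q d : Int) :
    PySem.List.pyGetD (p ++ [q]) (p.length : Int) d = q := by
  rw [PySem.List.pyGetD_natCast, List.getD_eq_getElem?_getD, List.getElem?_concat_length]
  rfl

lemma mask_eq (p : List Int) (hpos : ∀ x ∈ p, 0 ≤ x) (hinc : p.Pairwise (· < ·)) (hne : p ≠ []) :
    (PySem.List.pyRange 1 (p.length : Int)).foldl
      (fun line i =>
        line ++ List.replicate
          (PySem.List.pyGetD p i 0 - PySem.List.pyGetD p (i - 1) 0 - 1).toNat ' ' ++ ['*'])
      (List.replicate (PySem.List.pyGetD p 0 0).toNat ' ' ++ ['*'])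
    = (PySem.List.pyRange 0 (p.getLast hne + 1)).map (fun i => if p.contains i then '*' else ' ') := by
  induction p using List.reverseRecOn with
  | nil => exact absurd rfl hne
  | append_singleton t q ih =>
    have hq0 : 0 ≤ q := hpos q (by simp)
    by_cases ht : t = []
    · subst ht
      simp only [List.nil_append, List.length_cons, List.length_nil]
      rw [show ((1 : Nat) : Int) = 1 from rfl]
      rw [show PySem.List.pyRange 1 1 = [] by rfl, List.foldl_nil]
      rw [show PySem.List.pyGetD [q] 0 0 = q from
        by rw [show (0 : Int) = ((0 : Nat) : Int) from rfl, PySem.List.pyGetD_natCast]; rfl]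
      rw [show ([q].getLast hne) = q from rfl]
      rw [PySem.List.pyRange_one_succ_right hq0, List.map_append]
      have hb := mask_blank [q] q.toNat 0 q (by omega) (by intro i h1 h2; simp; omega)
      congr 1
      · exact hb.symm
      · simp
    · -- t nonempty
      have hinc_t : t.Pairwise (· < ·) := hinc.sublist (List.sublist_append_left t [q])
      have hpos_t : ∀ x ∈ t, 0 ≤ x := fun x hx => hpos x (by simp [hx])
      have hqt : ∀ y ∈ t, y < q := by
        have h3 := (List.pairwise_append.mp hinc).2.2
        exact fun y hy => h3 y hy q (List.mem_singleton_self q)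
      have hLmem : t.getLast ht ∈ t := List.getLast_mem ht
      have hL0 : 0 ≤ t.getLast ht := hpos_t _ hLmem
      have hLq : t.getLast ht < q := hqt _ hLmem
      have hLmax : ∀ y ∈ t, y ≤ t.getLast ht := sorted_le_getLast t hinc_t ht
      have hn1 : 1 ≤ t.length := List.length_pos_of_ne_nil ht
      -- left side: split off the last loop iteration
      rw [show (((t ++ [q]).length : Nat) : Int) = ((t.length : Nat) : Int) + 1 by
        simp]
      rw [PySem.List.pyRange_one_succ_right (by exact_mod_cast hn1), List.foldl_append]
      rw [show PySem.List.pyGetD (t ++ [q]) 0 0 = PySem.List.pyGetD t 0 0 from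
        pyGetD_append_left t [q] 0 le_rfl (by exact_mod_cast hn1) 0]
      have hcongr := PySem.List.foldl_congr_mem
        (PySem.List.pyRange 1 ((t.length : Nat) : Int))
        (fun line i =>
          line ++ List.replicate
            (PySem.List.pyGetD (t ++ [q]) i 0 - PySem.List.pyGetD (t ++ [q]) (i - 1) 0 - 1).toNat
            ' ' ++ ['*'])
        (fun line i =>
          line ++ List.replicate
            (PySem.List.pyGetD t i 0 - PySem.List.pyGetD t (i - 1) 0 - 1).toNat ' ' ++ ['*'])
        (List.replicate (PySem.List.pyGetD t 0 0).toNat ' ' ++ ['*'])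
        (by
          intro acc i hi
          rw [PySem.List.mem_pyRange_one] at hi
          beta_reduce
          rw [pyGetD_append_left t [q] i (by omega) (by omega),
            pyGetD_append_left t [q] (i - 1) (by omega) (by omega)])
      rw [hcongr]
      rw [ih hpos_t hinc_t ht]
      simp only [List.foldl_cons, List.foldl_nil]
      rw [pyGetD_concat_last t q 0]
      rw [show ((t.length : Nat) : Int) - 1 = (((t.length - 1 : Nat)) : Int) by omega]
      rw [show PySem.List.pyGetD (t ++ [q]) ((t.length - 1 : Nat) : Int) 0 = t.getLast ht from by
        rw [pyGetD_append_left t [q] _ (by omega) (by simp; omega), PySem.List.pyGetD_natCast,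
          List.getD_eq_getElem t 0 (by omega), List.getLast_eq_getElem]]
      -- right side
      rw [show (t ++ [q]).getLast hne = q from List.getLast_concat]
      rw [PySem.List.pyRange_one_append 0 (t.getLast ht + 1) (q + 1) (by omega) (by omega),
        PySem.List.pyRange_one_succ_right (a := t.getLast ht + 1) (b := q) (by omega),
        List.map_append, List.map_append]
      rw [mask_blank (t ++ [q]) (q - (t.getLast ht + 1)).toNat (t.getLast ht + 1) q rfl
        (by
          intro i h1 h2 hmem
          rcases List.mem_append.mp hmem with h | h
          · exact absurd (hLmax i h) (by omega)
          · rw [List.mem_singleton] at h; omega)]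
      rw [show List.map (fun i => if (t ++ [q]).contains i then '*' else ' ')
            (PySem.List.pyRange 0 (t.getLast ht + 1))
          = List.map (fun i => if t.contains i then '*' else ' ')
            (PySem.List.pyRange 0 (t.getLast ht + 1)) from
        List.map_congr_left (by
          intro i hi
          rw [PySem.List.mem_pyRange_one] at hi
          have hiq : i ≠ q := by omega
          simp [hiq])]
      rw [show List.map (fun i => if (t ++ [q]).contains i then '*' else ' ') [q] = ['*'] by
        simp]
      rw [show (q - (t.getLast ht + 1)).toNat = (q - t.getLast ht - 1).toNat by omega]
      simp [List.append_assoc]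

lemma foldl_append_star (f : Int → List Char) (r : List Int) :
    ∀ (pre init : List Char),
      r.foldl (fun line i => line ++ f i ++ ['*']) (pre ++ init)
        = pre ++ r.foldl (fun line i => line ++ f i ++ ['*']) init := by
  induction r with
  | nil => intro pre init; rfl
  | cons a t ih =>
    intro pre init
    simp only [List.foldl_cons]
    rw [show ((pre ++ init) ++ f a ++ ['*']) = pre ++ (init ++ f a ++ ['*']) by simp]
    exact ih pre _

-- ===== VERDICT (by name: the statement is the Claim_ definition above) =====
set_option maxHeartbeats 1000000 in
theorem visualize_character_positions_spec : Claim_equal_visualize_character_positions := by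
  intro input _
  unfold Spec_visualize_character_positions
  simp only [visualize_character_positions, visualize_character_positions_alt]
  rw [sorted_keys, dictA_keys, PySem.List.dedup_eq_ofList]
  apply PySem.List.foldl_congr_mem
  intro acc c hc
  have hcl : c ∈ input.toList := (PySem.Set.mem_ofList _ c).mp hc
  congr 1
  have hOf : PySem.Set.ofList (posOf input.toList c) = posOf input.toList c :=
    ofList_nodup _ (posOf_nodup _ _)
  rw [dictA_getD, hOf, max_last (posOf input.toList c) (posOf_sorted _ _) (posOf_ne_nil _ _ hcl)]
  rw [show ('\'' :: c :: '\'' :: ':' :: ' ' ::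
        (List.replicate (PySem.List.pyGetD (posOf input.toList c) 0 0).toNat ' ' ++ ['*']))
      = ['\'', c, '\'', ':', ' '] ++
        (List.replicate (PySem.List.pyGetD (posOf input.toList c) 0 0).toNat ' ' ++ ['*']) from rfl]
  rw [foldl_append_star, mask_eq (posOf input.toList c) (posOf_nonneg _ _) (posOf_sorted _ _)
    (posOf_ne_nil _ _ hcl)]
  rfl
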